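-- pv_equiv track=rewrite | github.com/bhargavraju/practice-dsa | stacks/perfect_numbers.py | solve
-- ===== SOURCE A (Python) =====
-- def solve(A):
--     queue = ['1', '2']
--     i = 1
--     val = '1'
--     while True:
--         el = queue.pop(0)
--         if i == A:
--             val = el
--             break
--         new_elements = [el + '1', el + '2']
--         queue += new_elements
--         i += 1
--     return val + val[::-1]
-- ===== SOURCE B (Python) =====
-- def solve(A):
--     # bijective base-2 numeral of A over the digit characters one and two, computed by division
--     n = A
--     digits = []
--     while n > 0:
--         n -= 1
--         digits.append('1' if n % 2 == 0 else '2')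
--         n //= 2
--     val = ''.join(reversed(digits))
--     return val + val[::-1]
-- ===== Notes on version B (the rewrite author's own statement) =====
-- stated objective: faster
-- what changed: Replaces the O(A) BFS queue that pops and extends candidate strings until the A-th one with a direct O(log A) computation of A's bijective base-two numeral by repeated division.
import Mathlib
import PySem

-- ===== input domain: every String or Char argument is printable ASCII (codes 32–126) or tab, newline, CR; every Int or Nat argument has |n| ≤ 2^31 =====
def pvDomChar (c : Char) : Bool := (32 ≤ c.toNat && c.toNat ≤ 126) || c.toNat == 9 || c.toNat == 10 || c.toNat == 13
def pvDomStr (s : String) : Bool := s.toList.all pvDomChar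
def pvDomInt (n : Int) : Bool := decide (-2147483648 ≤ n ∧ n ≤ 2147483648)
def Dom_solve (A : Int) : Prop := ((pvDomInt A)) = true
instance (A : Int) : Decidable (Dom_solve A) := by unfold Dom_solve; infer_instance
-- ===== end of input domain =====

-- A generates the A-th string over {'1','2'} by an O(A) BFS queue; B computes the same
-- string directly as A's bijective base-two numeral by repeated division (asymptotically faster).
-- Strings are modelled as List Char internally (exact: only ASCII '1'/'2' concat/reverse occur).


-- ===== PORT A =====
-- the 'while True' loop: pop the front, stop when i == A, else enqueue the two children.
-- The [] branch is unreachable (the queue only grows); the final 'else' branch (i > A)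
-- is where the Python loops forever — excluded by Pre_solve (A < 1).
def solveLoopA (queue : List (List Char)) (i A : Int) : List Char :=
  match queue with
  | [] => []
  | el :: rest =>
    if i = A then el
    else if h : i < A then
      solveLoopA (rest ++ [el ++ ['1'], el ++ ['2']]) (i + 1) A
    else []
termination_by (A - i).toNat
decreasing_by omega

def solve (A : Int) : String :=
  let val := solveLoopA [['1'], ['2']] 1 A
  String.mk (val ++ val.reverse)

-- ===== PORT B =====
-- the 'while n > 0' loop: append '1'/'2' (digits, least significant first) to acc.
def altLoop (n : Int) (acc : List Char) : List Char :=
  if h : 0 < n then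
    let m := n - 1
    altLoop (PySem.Int.floordiv m 2)
      (acc ++ [if PySem.Int.mod m 2 = 0 then '1' else '2'])
  else acc
termination_by n.toNat
decreasing_by
  have h2 : PySem.Int.floordiv (n - 1) 2 = (n - 1) / 2 :=
    PySem.Int.floordiv_eq_ediv_of_pos (by omega)
  simp only [h2]; omega

def solve_alt (A : Int) : String :=
  let val := (altLoop A []).reverse
  String.mk (val ++ val.reverse)

-- ===== PRECONDITION & SPEC =====
-- Pre_ excludes non-positive A, on which the Python A never returns (its loop runs forever).
def Pre_solve (A : Int) : Prop := 1 ≤ A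
instance (A : Int) : Decidable (Pre_solve A) := by unfold Pre_solve; infer_instance
def pvWitness_solve : Int := (5)

def Spec_solve (A : Int) (out : String) : Prop := out = solve_alt A
instance (A : Int) (out : String) : Decidable (Spec_solve A out) := by unfold Spec_solve; infer_instance

-- ===== CLAIM (what is proved, stated in full; the proofs are below) =====
def Claim_equal_solve : Prop := ∀ (A : Int), Dom_solve A → Pre_solve A → Spec_solve A (solve A)

-- ===== LEMMAS AND PROOFS =====

-- the digit string B computes for n (most significant digit first)
def repB (n : Int) : List Char := (altLoop n []).reverse

theorem altLoop_pos (n : Int) (h : 0 < n) (acc : List Char) :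
    altLoop n acc = altLoop (PySem.Int.floordiv (n - 1) 2)
      (acc ++ [if PySem.Int.mod (n - 1) 2 = 0 then '1' else '2']) := by
  rw [altLoop, dif_pos h]

theorem altLoop_nonpos (n : Int) (h : ¬ 0 < n) (acc : List Char) :
    altLoop n acc = acc := by
  rw [altLoop, dif_neg h]

theorem altLoop_acc_aux (N : Nat) : ∀ (n : Int), n.toNat ≤ N → ∀ acc,
    altLoop n acc = acc ++ altLoop n [] := by
  induction N with
  | zero =>
    intro n hn acc
    rw [altLoop_nonpos n (by omega), altLoop_nonpos n (by omega)]; simp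
  | succ N ih =>
    intro n hn acc
    by_cases h : 0 < n
    · rw [altLoop_pos n h, altLoop_pos n h]
      have hfd : PySem.Int.floordiv (n - 1) 2 = (n - 1) / 2 :=
        PySem.Int.floordiv_eq_ediv_of_pos (by omega)
      have hle : (PySem.Int.floordiv (n - 1) 2).toNat ≤ N := by rw [hfd]; omega
      rw [ih _ hle, ih _ hle ([] ++ _)]
      simp
    · rw [altLoop_nonpos n h, altLoop_nonpos n h]; simp

theorem altLoop_acc (n : Int) (acc : List Char) :
    altLoop n acc = acc ++ altLoop n [] :=
  altLoop_acc_aux n.toNat n le_rfl acc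

theorem repB_odd (k : Int) (hk : 0 ≤ k) : repB (2 * k + 1) = repB k ++ ['1'] := by
  unfold repB
  rw [altLoop_pos _ (by omega)]
  have h1 : (2 * k + 1 : Int) - 1 = 2 * k := by ring
  have hm : PySem.Int.mod (2 * k) 2 = 0 := (PySem.Int.mod_eq_zero_iff_dvd _ _).mpr ⟨k, by ring⟩
  have hd : PySem.Int.floordiv (2 * k) 2 = k := by
    rw [PySem.Int.floordiv_eq_ediv_of_pos (by omega)]; omega
  rw [h1, hm, hd, if_pos rfl, altLoop_acc]
  simp

theorem repB_even (k : Int) (hk : 0 ≤ k) : repB (2 * k + 2) = repB k ++ ['2'] := by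
  unfold repB
  rw [altLoop_pos _ (by omega)]
  have h1 : (2 * k + 2 : Int) - 1 = 2 * k + 1 := by ring
  have hm : PySem.Int.mod (2 * k + 1) 2 = 1 := by
    rw [PySem.Int.mod_eq_emod_of_pos (by omega : (0:Int) < 2)]; omega
  have hd : PySem.Int.floordiv (2 * k + 1) 2 = k := by
    rw [PySem.Int.floordiv_eq_ediv_of_pos (by omega)]; omega
  rw [h1, hm, hd, if_neg (by omega), altLoop_acc]
  simp

theorem solveLoopA_cons (el : List Char) (rest : List (List Char)) (i A : Int) :
    solveLoopA (el :: rest) i A =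
      if i = A then el
      else if i < A then solveLoopA (rest ++ [el ++ ['1'], el ++ ['2']]) (i + 1) A
      else [] := by
  rw [solveLoopA]
  by_cases h1 : i = A
  · simp [h1]
  · by_cases h2 : i < A <;> simp [h1, h2]

theorem bfs_invariant_aux (A : Int) (N : Nat) : ∀ i : Int, 1 ≤ i → i ≤ A → (A - i).toNat ≤ N →
    solveLoopA ((PySem.List.pyRange i (2 * i + 1) 1).map repB) i A = repB A := by
  induction N with
  | zero =>
    intro i h1 h2 hN
    have hiA : i = A := by omega
    rw [PySem.List.pyRange_one_cons (by omega), List.map_cons, solveLoopA_cons, if_pos hiA, hiA]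
  | succ N ih =>
    intro i h1 h2 hN
    by_cases hiA : i = A
    · rw [PySem.List.pyRange_one_cons (by omega), List.map_cons, solveLoopA_cons, if_pos hiA, hiA]
    · have hlt : i < A := by omega
      rw [PySem.List.pyRange_one_cons (by omega), List.map_cons, solveLoopA_cons,
        if_neg hiA, if_pos hlt]
      have r1 : PySem.List.pyRange (i + 1) (2 * (i + 1) + 1) 1 =
          (PySem.List.pyRange (i + 1) (2 * i + 1) 1 ++ [2 * i + 1]) ++ [2 * i + 2] := by
        have e1 : 2 * (i + 1) + 1 = (2 * i + 2) + 1 := by ring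
        rw [e1, PySem.List.pyRange_one_succ_right (by omega)]
        congr 1
        have e2 : (2 * i + 2 : Int) = (2 * i + 1) + 1 := by ring
        rw [e2, PySem.List.pyRange_one_succ_right (by omega)]
      have hq : (PySem.List.pyRange (i + 1) (2 * i + 1) 1).map repB ++
          [repB i ++ ['1'], repB i ++ ['2']] =
          (PySem.List.pyRange (i + 1) (2 * (i + 1) + 1) 1).map repB := by
        rw [r1, List.map_append, List.map_append, List.map_singleton, List.map_singleton,
          repB_odd i (by omega), repB_even i (by omega)]
        simp
      rw [hq]
      exact ih (i + 1) (by omega) (by omega) (by omega)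

theorem repB_one : repB 1 = ['1'] := by
  have h0 : repB 0 = [] := by unfold repB; rw [altLoop_nonpos 0 (by omega)]; rfl
  have := repB_odd 0 le_rfl
  simpa [h0] using this

theorem repB_two : repB 2 = ['2'] := by
  have h0 : repB 0 = [] := by unfold repB; rw [altLoop_nonpos 0 (by omega)]; rfl
  have := repB_even 0 le_rfl
  simpa [h0] using this

-- ===== VERDICT (by name: the statement is the Claim_ definition above) =====
theorem solve_spec : Claim_equal_solve := by
  intro A _ hA
  unfold Spec_solve solve solve_alt
  have hq : ([['1'], ['2']] : List (List Char)) = (PySem.List.pyRange 1 (2 * 1 + 1) 1).map repB := by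
    have : PySem.List.pyRange 1 (2 * 1 + 1) 1 = [1, 2] := by decide
    rw [this, List.map_cons, List.map_cons, List.map_nil, repB_one, repB_two]
  rw [hq, bfs_invariant_aux A (A - 1).toNat 1 le_rfl hA (by omega)]
  rfl
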